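-- pv_equiv track=rewrite | github.com/Maxwell-Hunt/Canadian-Computing-Competition-CCC-Solutions | CCC/2012Junior/2012J5.py | getPermutations
-- ===== SOURCE A (Python) =====
-- def deepCopy(myList):
-- 	new = []
-- 	for i in range(len(myList)):
-- 		new.append(myList[i][:])
-- 	return new
--
-- def getPermutations(order):
-- 	permutations = []
-- 	for i in range(len(order)):
-- 		if(order[i]):
-- 			if(i != len(order) - 1):
-- 				if(not order[i + 1] or order[i][0] < order[i + 1][0]):
-- 					permutation = deepCopy(order)
--
-- 					permutation[i + 1].insert(0, permutation[i][0])
-- 					permutation[i].remove(permutation[i][0])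
-- 					permutations.append(permutation)
--
--
-- 			if(i != 0):
-- 				if(not order[i - 1] or order[i][0] < order[i - 1][0]):
-- 					permutation = deepCopy(order)
--
-- 					permutation[i - 1].insert(0, permutation[i][0])
-- 					permutation[i].remove(permutation[i][0])
-- 					permutations.append(permutation)
--
--
-- 	return permutations
-- ===== SOURCE B (Python) =====
-- def getPermutations(order):
--     # Single left-to-right zipper sweep over stack boundaries with a one-step
--     # delay buffer: at each position emit the right-move config, then the
--     # left-move config prepared at the previous boundary; configurations are
--     # rebuilt structurally as prefix + modified pair + suffix (no copy+mutate).
--     out = []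
--     pre = []            # stacks already passed
--     pending = None      # left-move config prepared at the previous boundary
--     rest = list(order)
--     while rest:
--         cur = rest.pop(0)
--         if cur and rest and (not rest[0] or cur[0] < rest[0][0]):
--             out.append(pre + [cur[1:], [cur[0]] + rest[0]] + rest[1:])
--         if pending is not None:
--             out.append(pending)
--         pending = None
--         if rest and rest[0] and (not cur or rest[0][0] < cur[0]):
--             pending = pre + [[rest[0][0]] + cur, rest[0][1:]] + rest[1:]
--         pre = pre + [cur]
--     return out
-- ===== Notes on version B (the rewrite author's own statement) =====
-- stated objective: alternative
-- what changed: B replaces A's index loop with deep-copy-then-mutate (insert/remove on a full copy) by a single left-to-right zipper sweep over the list of stacks: it keeps a prefix accumulator and a one-step delay buffer holding the left-move configuration prepared at the previous boundary, and rebuilds each successor structurally as prefix + modified adjacent pair + suffix, with no indices and no mutation of copies.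
import Mathlib
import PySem

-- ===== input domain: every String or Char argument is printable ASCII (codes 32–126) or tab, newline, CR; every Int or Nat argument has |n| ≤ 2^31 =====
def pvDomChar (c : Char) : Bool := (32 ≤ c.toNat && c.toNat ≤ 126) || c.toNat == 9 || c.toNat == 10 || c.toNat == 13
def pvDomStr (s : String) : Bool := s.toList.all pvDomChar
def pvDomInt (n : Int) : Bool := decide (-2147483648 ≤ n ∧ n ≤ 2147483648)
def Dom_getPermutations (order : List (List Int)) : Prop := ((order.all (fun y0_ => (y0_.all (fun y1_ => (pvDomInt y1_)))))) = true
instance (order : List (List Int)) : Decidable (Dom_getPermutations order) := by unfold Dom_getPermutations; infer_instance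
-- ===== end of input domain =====

-- B replaces A's index loop with deep-copy-then-mutate by a single zipper sweep with a
-- one-step delay buffer, rebuilding each successor as prefix ++ modified pair ++ suffix
-- (objective: alternative).

-- ===== PORT A =====
def deepCopy (myList : List (List Int)) : List (List Int) :=
  (List.range myList.length).foldl
    (fun new i => new ++ [PySem.List.slice (myList.getD i []) none none]) []

def getPermutations (order : List (List Int)) : List (List (List Int)) :=
  (List.range order.length).foldl (fun permutations i =>
    if order.getD i [] ≠ [] then
      let permutations :=
        if i ≠ order.length - 1 then
          if order.getD (i+1) [] = [] ∨
             (order.getD i []).headD 0 < (order.getD (i+1) []).headD 0 then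
            let p := deepCopy order
            let p := p.set (i+1) (PySem.List.insert (p.getD (i+1) []) 0 ((p.getD i []).headD 0))
            let p := p.set i ((PySem.List.remove? (p.getD i []) ((p.getD i []).headD 0)).getD (p.getD i []))
            permutations ++ [p]
          else permutations
        else permutations
      if i ≠ 0 then
        if order.getD (i-1) [] = [] ∨
           (order.getD i []).headD 0 < (order.getD (i-1) []).headD 0 then
          let p := deepCopy order
          let p := p.set (i-1) (PySem.List.insert (p.getD (i-1) []) 0 ((p.getD i []).headD 0))
          let p := p.set i ((PySem.List.remove? (p.getD i []) ((p.getD i []).headD 0)).getD (p.getD i []))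
          permutations ++ [p]
        else permutations
      else permutations
    else permutations) []

-- ===== PORT B =====
-- Source B's while-loop: zipper state = (pre, pending, rest), accumulator out
def goB (pre : List (List Int)) (pending : Option (List (List Int)))
    (rest : List (List Int)) (out : List (List (List Int))) : List (List (List Int)) :=
  match rest with
  | [] => out
  | cur :: rs =>
    let out1 := if cur ≠ [] ∧ rs ≠ [] ∧ (rs.headD [] = [] ∨ cur.headD 0 < (rs.headD []).headD 0)
                then out ++ [pre ++ [cur.drop 1, cur.headD 0 :: rs.headD []] ++ rs.drop 1]
                else out
    let out2 := match pending with | some p => out1 ++ [p] | none => out1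
    let pending' := if rs ≠ [] ∧ rs.headD [] ≠ [] ∧ (cur = [] ∨ (rs.headD []).headD 0 < cur.headD 0)
                then some (pre ++ [(rs.headD []).headD 0 :: cur, (rs.headD []).drop 1] ++ rs.drop 1)
                else none
    goB (pre ++ [cur]) pending' rs out2

def getPermutations_alt (order : List (List Int)) : List (List (List Int)) :=
  goB [] none order []

-- ===== PRECONDITION & SPEC =====
def Spec_getPermutations (order : List (List Int)) (out : List (List (List Int))) : Prop := out = getPermutations_alt order
instance (order : List (List Int)) (out : List (List (List Int))) : Decidable (Spec_getPermutations order out) := by unfold Spec_getPermutations; infer_instance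

-- ===== CLAIM (what is proved, stated in full; the proofs are below) =====
def Claim_equal_getPermutations : Prop := ∀ (order : List (List Int)), Dom_getPermutations order → Spec_getPermutations order (getPermutations order)

-- ===== LEMMAS AND PROOFS =====

lemma deepCopy_eq (l : List (List Int)) : deepCopy l = l := by
  unfold deepCopy
  simp only [PySem.List.slice_none_none, PySem.List.foldl_append_singleton_eq_map, List.nil_append]
  apply List.ext_getElem
  · simp
  · intro i hi _
    simp only [List.length_map, List.length_range] at hi
    simp [List.getD_eq_getElem?_getD, List.getElem?_eq_getElem (by simpa using hi)]

-- the configuration A materializes for a move from stack i onto stack j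
def permA (order : List (List Int)) (i j : Nat) : List (List Int) :=
  let p := deepCopy order
  let p := p.set j (PySem.List.insert (p.getD j []) 0 ((p.getD i []).headD 0))
  p.set i ((PySem.List.remove? (p.getD i []) ((p.getD i []).headD 0)).getD (p.getD i []))

lemma insert_zero (l : List Int) (x : Int) : PySem.List.insert l 0 x = x :: l := by
  simp [PySem.List.insert, PySem.List.sliceIndices]

lemma permA_set_set (order : List (List Int)) (i j : Nat) (v : Int) (t : List Int)
    (hij : i ≠ j) (hv : order.getD i [] = v :: t) :
    permA order i j = (order.set j (v :: order.getD j [])).set i t := by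
  unfold permA
  dsimp only
  rw [deepCopy_eq]
  have hset : (order.set j (PySem.List.insert (order.getD j []) 0 ((order.getD i []).headD 0))).getD i []
      = order.getD i [] := by
    simp [List.getD_eq_getElem?_getD, hij.symm]
  rw [hset, hv]
  simp [insert_zero, PySem.List.remove?_cons_self]

lemma set_set_adj (l : List (List Int)) (i : Nat) (x y : List Int) (h : i + 1 < l.length) :
    (l.set (i+1) y).set i x = l.take i ++ [x, y] ++ l.drop (i+2) := by
  rw [List.set_eq_take_cons_drop y h,
      List.set_eq_take_cons_drop x (by simp; omega),
      List.take_append_of_le_length (by simp; omega),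
      List.take_take, min_eq_left (by omega),
      List.drop_append_of_le_length (by simp; omega)]
  have h0 : (l.take (i+1)).drop (i+1) = [] := by simp
  rw [h0]
  simp

lemma permA_right (order : List (List Int)) (i : Nat) (v : Int) (t : List Int)
    (h : i + 1 < order.length) (hv : order.getD i [] = v :: t) :
    permA order i (i+1)
      = order.take i ++ [t, v :: order.getD (i+1) []] ++ order.drop (i+2) := by
  rw [permA_set_set order i (i+1) v t (by omega) hv, set_set_adj order i t _ h]

lemma permA_left (order : List (List Int)) (i : Nat) (v : Int) (t : List Int)
    (h0 : 0 < i) (h : i < order.length) (hv : order.getD i [] = v :: t) :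
    permA order i (i-1)
      = order.take (i-1) ++ [v :: order.getD (i-1) [], t] ++ order.drop (i+1) := by
  rw [permA_set_set order i (i-1) v t (by omega) hv,
      List.set_comm _ _ (by omega : i - 1 ≠ i)]
  have h' : (i-1) + 1 < order.length := by omega
  have key := set_set_adj order (i-1) (v :: order.getD (i-1) []) t h'
  rw [show i-1+1 = i by omega, show i-1+2 = i+1 by omega] at key
  exact key

-- configurations emitted for index i (right move first, then left move)
def contrib (order : List (List Int)) (i : Nat) : List (List (List Int)) :=
  (if order.getD i [] ≠ [] ∧ i ≠ order.length - 1 ∧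
      (order.getD (i+1) [] = [] ∨ (order.getD i []).headD 0 < (order.getD (i+1) []).headD 0)
   then [permA order i (i+1)] else []) ++
  (if order.getD i [] ≠ [] ∧ i ≠ 0 ∧
      (order.getD (i-1) [] = [] ∨ (order.getD i []).headD 0 < (order.getD (i-1) []).headD 0)
   then [permA order i (i-1)] else [])

lemma foldl_body {α β : Type} (l : List α) (f : List β → α → List β) (g : α → List β)
    (acc : List β) (h : ∀ acc x, f acc x = acc ++ g x) : List.foldl f acc l = acc ++ l.flatMap g := by
  rw [show f = fun acc x => acc ++ g x from funext₂ h, PySem.List.foldl_append_eq_flatMap]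

set_option maxRecDepth 4096 in
theorem A_flat (order : List (List Int)) :
    getPermutations order = (List.range order.length).flatMap (contrib order) := by
  unfold getPermutations
  refine (foldl_body _ _ (contrib order) _ ?_).trans (List.nil_append _)
  intro perms i
  dsimp only
  by_cases h0 : order[i]?.getD [] = ([] : List Int)
  · simp [contrib, h0]
  · by_cases hL : i = 0
    · subst hL
      by_cases hR : (0:Nat) = order.length - 1
      · simp [contrib, h0, ← hR]
      · by_cases c1 : order[0 + 1]?.getD [] = ([] : List Int) ∨
            (order[0]?.getD ([]:List Int)).head?.getD 0 < (order[0+1]?.getD []).head?.getD 0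
        · simp [contrib, permA, h0, hR, c1]
        · simp [contrib, h0, hR, c1]
    · by_cases c2 : order[i - 1]?.getD [] = ([] : List Int) ∨
          (order[i]?.getD ([]:List Int)).head?.getD 0 < (order[i-1]?.getD []).head?.getD 0
      · by_cases hR : i = order.length - 1
        · subst hR; simp [contrib, permA, h0, hL, c2]
        · by_cases c1 : order[i + 1]?.getD [] = ([] : List Int) ∨
              (order[i]?.getD ([]:List Int)).head?.getD 0 < (order[i+1]?.getD []).head?.getD 0
          · simp [contrib, permA, h0, hL, hR, c1, c2]
          · simp [contrib, permA, h0, hL, hR, c1, c2]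
      · by_cases hR : i = order.length - 1
        · subst hR; simp [contrib, h0, hL, c2]
        · by_cases c1 : order[i + 1]?.getD [] = ([] : List Int) ∨
              (order[i]?.getD ([]:List Int)).head?.getD 0 < (order[i+1]?.getD []).head?.getD 0
          · simp [contrib, permA, h0, hL, hR, c1, c2]
          · simp [contrib, h0, hL, hR, c1, c2]

-- the pending buffer entering step i: the left-move configuration prepared at step i-1
def Pend (order : List (List Int)) (i : Nat) : Option (List (List Int)) :=
  if 0 < i ∧ order.drop i ≠ [] ∧ order.getD i [] ≠ [] ∧
      (order.getD (i-1) [] = [] ∨ (order.getD i []).headD 0 < (order.getD (i-1) []).headD 0)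
  then some (order.take (i-1) ++
        [(order.getD i []).headD 0 :: order.getD (i-1) [], (order.getD i []).drop 1] ++
        order.drop (i+1))
  else none

lemma headD_drop (l : List (List Int)) (k : Nat) :
    (l.drop k).headD [] = l.getD k [] := by
  simp [List.head?_drop, List.getD_eq_getElem?_getD]

lemma goB_inv (order : List (List Int)) :
    ∀ m i out, order.length - i = m → i ≤ order.length →
    goB (order.take i) (Pend order i) (order.drop i) out
      = out ++ (List.range' i m).flatMap (contrib order) := by
  intro m
  induction m with
  | zero =>
    intro i out hm hi
    have : order.drop i = [] := by rw [List.drop_eq_nil_iff]; omega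
    rw [this, goB]
    simp
  | succ m ih =>
    intro i out hm hi
    have hilt : i < order.length := by omega
    have hdrop : order.drop i = order[i] :: order.drop (i+1) := List.drop_eq_getElem_cons hilt
    have hgd : order.getD i [] = order[i] := by
      simp [List.getD_eq_getElem?_getD, List.getElem?_eq_getElem hilt]
    have htake : order.take i ++ [order[i]] = order.take (i+1) := by
      rw [List.take_add_one, List.getElem?_eq_getElem hilt]; rfl
    have hhead : (order.drop (i+1)).headD [] = order.getD (i+1) [] := headD_drop order (i+1)
    have hdd : (order.drop (i+1)).drop 1 = order.drop (i+2) := by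
      rw [List.drop_drop]
    rw [hdrop, goB.eq_def]
    dsimp only
    -- identify the new pending with Pend order (i+1)
    have hpend' :
        (if order.drop (i+1) ≠ [] ∧ (order.drop (i+1)).headD [] ≠ [] ∧
            (order[i] = [] ∨ ((order.drop (i+1)).headD []).headD 0 < order[i].headD 0)
         then some (order.take i ++
              [((order.drop (i+1)).headD []).headD 0 :: order[i], ((order.drop (i+1)).headD []).drop 1] ++
              (order.drop (i+1)).drop 1)
         else none) = Pend order (i+1) := by
      rw [Pend]
      have : (0 < i + 1 ∧ order.drop (i+1) ≠ [] ∧ order.getD (i+1) [] ≠ [] ∧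
          (order.getD (i+1-1) [] = [] ∨ (order.getD (i+1) []).headD 0 < (order.getD (i+1-1) []).headD 0))
          ↔ (order.drop (i+1) ≠ [] ∧ (order.drop (i+1)).headD [] ≠ [] ∧
          (order[i] = [] ∨ ((order.drop (i+1)).headD []).headD 0 < order[i].headD 0)) := by
        rw [hhead]
        simp only [Nat.add_sub_cancel, hgd]
        constructor
        · rintro ⟨_, a, b, c⟩; exact ⟨a, b, c⟩
        · rintro ⟨a, b, c⟩; exact ⟨by omega, a, b, c⟩
      rw [if_congr this rfl rfl]
      split
      · rw [hhead, hdd]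
        simp only [Nat.add_sub_cancel, hgd]
      · rfl
    rw [hpend', htake]
    -- identify the emitted block with contrib order i
    have hout :
        (match Pend order i with
          | some p =>
              (if order[i] ≠ [] ∧ order.drop (i+1) ≠ [] ∧
                  ((order.drop (i+1)).headD [] = [] ∨ order[i].headD 0 < ((order.drop (i+1)).headD []).headD 0)
               then out ++ [order.take i ++ [order[i].drop 1, order[i].headD 0 :: (order.drop (i+1)).headD []] ++ (order.drop (i+1)).drop 1]
               else out) ++ [p]
          | none =>
              (if order[i] ≠ [] ∧ order.drop (i+1) ≠ [] ∧
                  ((order.drop (i+1)).headD [] = [] ∨ order[i].headD 0 < ((order.drop (i+1)).headD []).headD 0)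
               then out ++ [order.take i ++ [order[i].drop 1, order[i].headD 0 :: (order.drop (i+1)).headD []] ++ (order.drop (i+1)).drop 1]
               else out))
          = out ++ contrib order i := by
      have hrest : order.drop (i+1) ≠ [] ↔ i ≠ order.length - 1 := by
        rw [ne_eq, List.drop_eq_nil_iff]; omega
      -- right part
      have hr :
          (if order[i] ≠ [] ∧ order.drop (i+1) ≠ [] ∧
              ((order.drop (i+1)).headD [] = [] ∨ order[i].headD 0 < ((order.drop (i+1)).headD []).headD 0)
           then out ++ [order.take i ++ [order[i].drop 1, order[i].headD 0 :: (order.drop (i+1)).headD []] ++ (order.drop (i+1)).drop 1]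
           else out)
          = out ++ (if order.getD i [] ≠ [] ∧ i ≠ order.length - 1 ∧
              (order.getD (i+1) [] = [] ∨ (order.getD i []).headD 0 < (order.getD (i+1) []).headD 0)
             then [permA order i (i+1)] else []) := by
        rw [hhead, hdd, hgd]
        by_cases hc : order[i] ≠ [] ∧ order.drop (i+1) ≠ [] ∧
            (order.getD (i+1) [] = [] ∨ order[i].headD 0 < (order.getD (i+1) []).headD 0)
        · obtain ⟨a, b, c⟩ := hc
          have hip1 : i + 1 < order.length := by
            rw [ne_eq, List.drop_eq_nil_iff] at b; omega
          rw [if_pos ⟨a, b, c⟩, if_pos ⟨a, hrest.mp b, c⟩]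
          cases hv : order[i] with
          | nil => exact absurd hv a
          | cons v t =>
            rw [permA_right order i v t hip1 (by rw [hgd, hv])]
            simp
        · rw [if_neg hc, if_neg (by rw [← hrest] at *; tauto)]
          simp
      -- left part
      have hl : (Pend order i).toList
          = (if order.getD i [] ≠ [] ∧ i ≠ 0 ∧
              (order.getD (i-1) [] = [] ∨ (order.getD i []).headD 0 < (order.getD (i-1) []).headD 0)
             then [permA order i (i-1)] else []) := by
        rw [Pend]
        have hdne : order.drop i ≠ [] := by rw [ne_eq, List.drop_eq_nil_iff]; omega
        by_cases hc : 0 < i ∧ order.getD i [] ≠ [] ∧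
            (order.getD (i-1) [] = [] ∨ (order.getD i []).headD 0 < (order.getD (i-1) []).headD 0)
        · obtain ⟨a, b, c⟩ := hc
          rw [if_pos ⟨a, hdne, b, c⟩, if_pos ⟨b, by omega, c⟩]
          cases hv : order.getD i [] with
          | nil => exact absurd hv b
          | cons v t =>
            rw [permA_left order i v t a hilt hv]
            simp
        · rw [if_neg (by tauto), if_neg (by intro ⟨a, b, c⟩; exact hc ⟨by omega, a, c⟩)]
          rfl
      cases hp : Pend order i with
      | none =>
        rw [hp] at hl
        rw [contrib, ← List.append_assoc, ← hr, ← hl]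
        exact (List.append_nil _).symm
      | some p =>
        rw [hp] at hl
        rw [contrib, ← List.append_assoc, ← hr, ← hl]
        rfl
    rw [hout]
    rw [ih (i+1) (out ++ contrib order i) (by omega) (by omega)]
    rw [List.range'_succ, List.flatMap_cons, List.append_assoc]

theorem B_flat (order : List (List Int)) :
    getPermutations_alt order = (List.range order.length).flatMap (contrib order) := by
  have h := goB_inv order order.length 0 [] (by omega) (by omega)
  have hp : Pend order 0 = none := by simp [Pend]
  rw [List.take_zero, List.drop_zero, hp] at h
  rw [getPermutations_alt, h, List.range_eq_range']
  simp

-- ===== VERDICT (by name: the statement is the Claim_ definition above) =====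
theorem getPermutations_spec : Claim_equal_getPermutations := by
  intro order _
  unfold Spec_getPermutations
  exact (A_flat order).trans (B_flat order).symm
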